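-- pv_equiv track=rewrite | github.com/svend4/meta | projects/hexnet/hexnet.py | ecube_route
-- ===== SOURCE A (Python) =====
-- def ecube_route(src: int, dst: int) -> list[int]:
--     """
--     E-cube (dimension-ordered) маршрутизация: исправлять биты по очереди 0..5.
--     Длина маршрута = hamming(src, dst).
--     Детерминированная, минимальная.
--     """
--     path = [src]
--     current = src
--     diff = current ^ dst
--     for bit in range(6):
--         if diff & (1 << bit):
--             current ^= (1 << bit)
--             path.append(current)
--     return path
-- ===== SOURCE B (Python) =====
-- def ecube_route(src: int, dst: int) -> list[int]:
--     # Recursive formulation: repeatedly peel the LOWEST differing bit inside the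
--     # 6-bit cube with the two's-complement trick diff & -diff and recurse from
--     # the node just moved to; the base case (no differing bit) returns [src].
--     diff = (src ^ dst) & 63
--     if diff == 0:
--         return [src]
--     low = diff & -diff
--     return [src] + ecube_route(src ^ low, dst)
-- ===== Notes on version B (the rewrite author's own statement) =====
-- stated objective: alternative
-- what changed: Replaces A's fixed scan over bit indices 0..5 that threads a mutable `current` with a recursive peel-lowest-set-bit algorithm: mask the diff to 6 bits once, extract the lowest differing bit with the two's-complement trick diff & -diff, step there and recurse.
import Mathlib
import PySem

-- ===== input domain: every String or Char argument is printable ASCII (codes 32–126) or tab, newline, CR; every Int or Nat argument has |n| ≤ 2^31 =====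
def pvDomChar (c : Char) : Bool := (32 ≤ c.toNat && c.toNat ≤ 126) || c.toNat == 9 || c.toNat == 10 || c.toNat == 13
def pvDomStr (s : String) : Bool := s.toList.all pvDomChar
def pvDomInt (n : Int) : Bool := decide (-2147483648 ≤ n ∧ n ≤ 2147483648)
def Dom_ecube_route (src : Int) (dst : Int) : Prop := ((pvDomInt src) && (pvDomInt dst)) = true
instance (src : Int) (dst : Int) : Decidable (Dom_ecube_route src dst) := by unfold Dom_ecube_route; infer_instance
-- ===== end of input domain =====

-- B replaces A's fixed scan over bit indices 0..5 (threading a mutable `current`) by a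
-- recursion that peels the lowest differing bit with diff & -diff (objective: alternative).

-- ===== PORT A =====
def ecubeStepA (diff : Int) (st : List Int × Int) (bit : Nat) : List Int × Int :=
  if PySem.Int.band diff ((1 : Int) <<< bit) != 0 then
    let current := PySem.Int.bxor st.2 ((1 : Int) <<< bit)
    (st.1 ++ [current], current)
  else st

def ecube_route (src : Int) (dst : Int) : List Int :=
  let diff := PySem.Int.bxor src dst
  ((List.range 6).foldl (ecubeStepA diff) ([src], src)).1

-- ===== PORT B =====
-- The fuel argument is ONLY a totality guard: the masked diff has at most 6 set bits and
-- loses one per recursive call, so fuel 7 is never exhausted and the `0` branch is dead.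
def pvAltGo : Nat → Int → Int → List Int
  | 0, src, _ => [src]
  | fuel+1, src, dst =>
    let diff := PySem.Int.band (PySem.Int.bxor src dst) 63
    if diff = 0 then [src]
    else
      let low := PySem.Int.band diff (-diff)
      src :: pvAltGo fuel (PySem.Int.bxor src low) dst

def ecube_route_alt (src : Int) (dst : Int) : List Int := pvAltGo 7 src dst

-- ===== PRECONDITION & SPEC =====
def Spec_ecube_route (src : Int) (dst : Int) (out : List Int) : Prop := out = ecube_route_alt src dst
instance (src : Int) (dst : Int) (out : List Int) : Decidable (Spec_ecube_route src dst out) := by unfold Spec_ecube_route; infer_instance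

-- ===== CLAIM (what is proved, stated in full; the proofs are below) =====
def Claim_equal_ecube_route : Prop := ∀ (src : Int) (dst : Int), Dom_ecube_route src dst → Spec_ecube_route src dst (ecube_route src dst)

-- ===== LEMMAS AND PROOFS =====

-- Pure-Nat "offset" views of the two paths (every node is src XOR an offset < 64).
def pvLowN (n : Nat) : Nat := n ^^^ (n &&& (n - 1))

def pvPathA (n : Nat) : List Nat :=
  0 :: ((List.range 6).filter (fun b => n.testBit b)).map (fun b => n &&& (2^(b+1)-1))

def pvPathB : Nat → Nat → List Nat
  | 0, _ => [0]
  | f+1, n => if n = 0 then [0] else 0 :: (pvPathB f (n ^^^ pvLowN n)).map (· ^^^ pvLowN n)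

theorem pv_ldiff_add (m : Nat) : ∀ n, m.ldiff n + (m &&& n) = m := by
  induction m using Nat.binaryRec with
  | zero => intro n; simp [Nat.ldiff]
  | bit a m ih =>
      intro n
      induction n using Nat.bitCasesOn with
      | bit b n =>
        rw [Nat.ldiff_bit, Nat.land_bit, Nat.bit_val, Nat.bit_val, Nat.bit_val]
        have := ih n
        cases a <;> cases b <;> simp <;> omega

theorem pv_bxor_eq (a b : Int) : PySem.Int.bxor a b = Int.xor a b := by
  cases a with
  | ofNat m => cases b with
    | ofNat n => simp [PySem.Int.bxor, Int.xor]
    | negSucc n =>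
        simp only [PySem.Int.bxor, Int.xor]
        have h0 : (0 : Int) ≤ Int.ofNat m := Int.natCast_nonneg m
        have h1 : ¬ (0 : Int) ≤ Int.negSucc n := by omega
        rw [if_pos h0, if_neg h1]
        have : (-(Int.negSucc n) - 1).toNat = n := by omega
        rw [this]
        have : (Int.ofNat m).toNat = m := rfl
        rw [this]
        omega
  | negSucc m => cases b with
    | ofNat n =>
        simp only [PySem.Int.bxor, Int.xor]
        have h0 : ¬ (0 : Int) ≤ Int.negSucc m := by omega
        rw [if_neg h0]
        have h1 : (0 : Int) ≤ Int.ofNat n := Int.natCast_nonneg n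
        rw [if_pos h1]
        have : (-(Int.negSucc m) - 1).toNat = m := by omega
        rw [this]
        have : (Int.ofNat n).toNat = n := rfl
        rw [this]
        omega
    | negSucc n =>
        simp only [PySem.Int.bxor, Int.xor]
        have h0 : ¬ (0 : Int) ≤ Int.negSucc m := by omega
        have h1 : ¬ (0 : Int) ≤ Int.negSucc n := by omega
        rw [if_neg h0, if_neg h1]
        have e1 : (-(Int.negSucc m) - 1).toNat = m := by omega
        have e2 : (-(Int.negSucc n) - 1).toNat = n := by omega
        rw [e1, e2]

theorem pv_band_eq (a b : Int) : PySem.Int.band a b = Int.land a b := by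
  cases a with
  | ofNat m => cases b with
    | ofNat n => simp [PySem.Int.band, Int.land]
    | negSucc n =>
        simp only [PySem.Int.band, Int.land]
        have h0 : (0 : Int) ≤ Int.ofNat m := Int.natCast_nonneg m
        have h1 : ¬ (0 : Int) ≤ Int.negSucc n := by omega
        rw [if_pos h0, if_neg h1]
        have e1 : (-(Int.negSucc n) - 1).toNat = n := by omega
        have e2 : (Int.ofNat m).toNat = m := rfl
        rw [e1, e2]
        have := pv_ldiff_add m n
        omega
  | negSucc m => cases b with
    | ofNat n =>
        simp only [PySem.Int.band, Int.land]
        have h0 : ¬ (0 : Int) ≤ Int.negSucc m := by omega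
        have h1 : (0 : Int) ≤ Int.ofNat n := Int.natCast_nonneg n
        rw [if_neg h0, if_pos h1]
        have e1 : (-(Int.negSucc m) - 1).toNat = m := by omega
        have e2 : (Int.ofNat n).toNat = n := rfl
        rw [e1, e2]
        have := pv_ldiff_add n m
        omega
    | negSucc n =>
        simp only [PySem.Int.band, Int.land]
        have h0 : ¬ (0 : Int) ≤ Int.negSucc m := by omega
        have h1 : ¬ (0 : Int) ≤ Int.negSucc n := by omega
        rw [if_neg h0, if_neg h1]
        have e1 : (-(Int.negSucc m) - 1).toNat = m := by omega
        have e2 : (-(Int.negSucc n) - 1).toNat = n := by omega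
        rw [e1, e2]
        omega

theorem pv_testBit_band (a b : Int) (i : Nat) :
    (PySem.Int.band a b).testBit i = (a.testBit i && b.testBit i) := by
  rw [pv_band_eq]; exact Int.testBit_land a b i

theorem pv_testBit_bxor (a b : Int) (i : Nat) :
    (PySem.Int.bxor a b).testBit i = (a.testBit i).xor (b.testBit i) := by
  rw [pv_bxor_eq]; exact Int.testBit_lxor a b i

theorem pv_testBit_natCast (n : Nat) (i : Nat) : ((n : Int)).testBit i = n.testBit i := rfl

theorem pv_int_ext {a b : Int} (h : ∀ i, a.testBit i = b.testBit i) : a = b := by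
  cases a with
  | ofNat m => cases b with
    | ofNat n => exact congrArg _ (Nat.eq_of_testBit_eq fun i => h i)
    | negSucc n =>
        exfalso
        have h1 := h (m + n)
        have hm : m.testBit (m+n) = false := Nat.testBit_lt_two_pow (lt_of_lt_of_le (Nat.lt_two_pow_self) (Nat.pow_le_pow_right (by norm_num) (by omega)))
        have hn : n.testBit (m+n) = false := Nat.testBit_lt_two_pow (lt_of_lt_of_le (Nat.lt_two_pow_self) (Nat.pow_le_pow_right (by norm_num) (by omega)))
        simp [Int.testBit, hm, hn] at h1
  | negSucc m => cases b with
    | ofNat n =>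
        exfalso
        have h1 := h (m + n)
        have hm : m.testBit (m+n) = false := Nat.testBit_lt_two_pow (lt_of_lt_of_le (Nat.lt_two_pow_self) (Nat.pow_le_pow_right (by norm_num) (by omega)))
        have hn : n.testBit (m+n) = false := Nat.testBit_lt_two_pow (lt_of_lt_of_le (Nat.lt_two_pow_self) (Nat.pow_le_pow_right (by norm_num) (by omega)))
        simp [Int.testBit, hm, hn] at h1
    | negSucc n =>
        have : m = n := Nat.eq_of_testBit_eq fun i => by
          have := h i; simpa [Int.testBit] using this
        simp [this]

theorem pv_zero_testBit (i : Nat) : (0 : Int).testBit i = false := by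
  show (Int.ofNat 0).testBit i = false
  simp [Int.testBit]

theorem pv_band_pow_ne_zero_iff (a : Int) (k : Nat) :
    PySem.Int.band a ((2^k : Nat) : Int) ≠ 0 ↔ a.testBit k = true := by
  constructor
  · intro h
    by_contra hf
    apply h
    apply pv_int_ext
    intro i
    rw [pv_testBit_band, pv_testBit_natCast, pv_zero_testBit]
    rcases eq_or_ne i k with rfl | hik
    · simp only [Bool.not_eq_true] at hf
      simp [hf]
    · simp [Ne.symm hik]
  · intro h hz
    have h2 : (PySem.Int.band a ((2^k : Nat) : Int)).testBit k = false := by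
      rw [hz]; exact pv_zero_testBit k
    rw [pv_testBit_band, pv_testBit_natCast, Nat.testBit_two_pow] at h2
    simp [h] at h2

theorem pv_one_shl (k : Nat) : (1 : Int) <<< k = ((2^k : Nat) : Int) := by
  simp [Int.shiftLeft_eq']

theorem pv_two_shl_sub_one (k : Nat) : (2 : Int) <<< k - 1 = ((2^(k+1) - 1 : Nat) : Int) := by
  have h1 : (1:Nat) ≤ 2^(k+1) := Nat.one_le_two_pow
  have : (2 : Int) <<< k = ((2^(k+1) : Nat) : Int) := by
    simp [Int.shiftLeft_eq']; ring
  rw [this]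
  omega

-- A's fold invariant: path so far and the running `current`, both in closed form.
theorem pv_fold_inv (src diff : Int) (n : Nat) :
    (List.range n).foldl (ecubeStepA diff) ([src], src)
      = (src :: ((List.range n).filter
            (fun (b : Nat) => PySem.Int.band diff ((1 : Int) <<< b) != 0)).map
            (fun (b : Nat) => PySem.Int.bxor src (PySem.Int.band diff ((2 : Int) <<< b - 1))),
         PySem.Int.bxor src (PySem.Int.band diff ((2^n - 1 : Nat) : Int))) := by
  induction n with
  | zero => simp [PySem.Int.band_zero, PySem.Int.bxor_zero]
  | succ n ih =>
      rw [List.range_succ, List.foldl_append, List.filter_append, List.map_append, ih]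
      by_cases h : diff.testBit n = true
      · have hne : PySem.Int.band diff ((1 : Int) <<< n) ≠ 0 := by
          rw [pv_one_shl]; exact (pv_band_pow_ne_zero_iff diff n).mpr h
        simp only [List.foldl_cons, List.foldl_nil, ecubeStepA, bne_iff_ne, ne_eq, hne,
          not_false_eq_true, if_pos, List.filter_cons, List.filter_nil,
          List.map_cons, List.map_nil]
        rw [pv_two_shl_sub_one, pv_one_shl]
        have hstep : PySem.Int.bxor (PySem.Int.bxor src (PySem.Int.band diff ((2^n - 1 : Nat) : Int))) ((2^n : Nat) : Int)
            = PySem.Int.bxor src (PySem.Int.band diff ((2^(n+1) - 1 : Nat) : Int)) := by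
          apply pv_int_ext
          intro i
          rw [pv_testBit_bxor, pv_testBit_bxor, pv_testBit_bxor, pv_testBit_band, pv_testBit_band,
              pv_testBit_natCast, pv_testBit_natCast, pv_testBit_natCast,
              Nat.testBit_two_pow_sub_one, Nat.testBit_two_pow_sub_one, Nat.testBit_two_pow]
          rcases eq_or_ne i n with rfl | hik
          · simp [h]
          · by_cases hlt : i < n
            · simp [hlt, Nat.lt_succ_of_lt hlt, Ne.symm hik]
            · have h1 : ¬ i < n + 1 := by omega
              simp [hlt, h1, Ne.symm hik]
        rw [hstep]
        simp
      · have hz : PySem.Int.band diff ((1 : Int) <<< n) = 0 := by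
          rw [pv_one_shl]
          by_contra hc
          exact h ((pv_band_pow_ne_zero_iff diff n).mp hc)
        have hb : diff.testBit n = false := Bool.eq_false_iff.mpr (fun hh => h hh)
        have hmask : PySem.Int.band diff ((2^(n+1) - 1 : Nat) : Int) = PySem.Int.band diff ((2^n - 1 : Nat) : Int) := by
          apply pv_int_ext
          intro i
          rw [pv_testBit_band, pv_testBit_band, pv_testBit_natCast, pv_testBit_natCast,
              Nat.testBit_two_pow_sub_one, Nat.testBit_two_pow_sub_one]
          rcases eq_or_ne i n with rfl | hik
          · simp [hb]
          · by_cases hlt : i < n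
            · simp [hlt, Nat.lt_succ_of_lt hlt]
            · have h1 : ¬ i < n + 1 := by omega
              simp [hlt, h1]
        rw [hmask]
        simp [ecubeStepA, hz]

-- Basic facts about the 6-bit masked diff.
theorem pv_band63_nonneg (a : Int) : 0 ≤ PySem.Int.band a 63 := by
  rw [pv_band_eq]
  cases a with
  | ofNat m => exact Int.natCast_nonneg _
  | negSucc m => exact Int.natCast_nonneg _

theorem pv_band63_lt (a : Int) : (PySem.Int.band a 63).toNat < 64 := by
  rw [pv_band_eq]
  cases a with
  | ofNat m =>
      have h : Int.land (Int.ofNat m) 63 = Int.ofNat (m &&& 63) := rfl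
      rw [h]
      show (((m &&& 63 : Nat) : Int)).toNat < 64
      rw [Int.toNat_natCast]
      have := Nat.and_le_right (n := m) (m := 63)
      omega
  | negSucc m =>
      have h : Int.land (Int.negSucc m) 63 = Int.ofNat (Nat.ldiff 63 m) := rfl
      rw [h]
      show (((Nat.ldiff 63 m : Nat) : Int)).toNat < 64
      rw [Int.toNat_natCast]
      have := pv_ldiff_add 63 m
      omega

theorem pv_band63_cast (a : Int) : PySem.Int.band a 63 = (((PySem.Int.band a 63).toNat : Nat) : Int) :=
  (Int.toNat_of_nonneg (pv_band63_nonneg a)).symm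

theorem pv_testBit_band63 (a : Int) (i : Nat) :
    (PySem.Int.band a 63).testBit i = (a.testBit i && decide (i < 6)) := by
  rw [pv_testBit_band]
  have h63 : ((63 : Int)).testBit i = decide (i < 6) := by
    have : (63 : Int) = ((63 : Nat) : Int) := rfl
    rw [this, pv_testBit_natCast]
    have : (63 : Nat) = 2^6 - 1 := rfl
    rw [this, Nat.testBit_two_pow_sub_one]
  rw [h63]

theorem pv_testBit_toNat (a : Int) (h : 0 ≤ a) (i : Nat) :
    (a.toNat).testBit i = a.testBit i := by
  rw [← pv_testBit_natCast, Int.toNat_of_nonneg h]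

theorem pv_nat_testBit_high {n i : Nat} (hn : n < 64) (hi : 6 ≤ i) : n.testBit i = false :=
  Nat.testBit_lt_two_pow (lt_of_lt_of_le hn (by
    have := Nat.pow_le_pow_right (show 1 ≤ 2 by norm_num) hi
    simpa using this))

theorem pv_ldiff_xor_and (a b : Nat) : Nat.ldiff a b = a ^^^ (a &&& b) := by
  apply Nat.eq_of_testBit_eq
  intro i
  rw [Nat.testBit_ldiff, Nat.testBit_xor, Nat.testBit_and]
  cases a.testBit i <;> cases b.testBit i <;> rfl

theorem pv_lowN_eq_ldiff (n : Nat) : pvLowN n = n.ldiff (n - 1) := by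
  rw [pv_ldiff_xor_and]
  rfl

theorem pv_lowN_le (n : Nat) : pvLowN n ≤ n := by
  have := pv_ldiff_add n (n - 1)
  rw [pv_lowN_eq_ldiff]
  omega

-- diff & -diff computed on the Int side equals the Nat-side pvLowN.
theorem pv_low_cast (n : Nat) (hn : n ≠ 0) :
    PySem.Int.band ((n : Nat) : Int) (-((n : Nat) : Int)) = ((pvLowN n : Nat) : Int) := by
  rw [pv_band_eq]
  have hneg : (-((n : Nat) : Int)) = Int.negSucc (n - 1) := by
    rw [Int.negSucc_eq]
    omega
  rw [hneg]
  show Int.land (Int.ofNat n) (Int.negSucc (n - 1)) = ((pvLowN n : Nat) : Int)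
  have h : Int.land (Int.ofNat n) (Int.negSucc (n - 1)) = Int.ofNat (n.ldiff (n - 1)) := rfl
  rw [h, pv_lowN_eq_ldiff]
  rfl

-- Stepping to src ^ lowbit replaces the masked diff by n ^^^ pvLowN n.
theorem pv_step_diff (src dst : Int) (n : Nat)
    (hn : n = (PySem.Int.band (PySem.Int.bxor src dst) 63).toNat) :
    PySem.Int.band (PySem.Int.bxor (PySem.Int.bxor src ((pvLowN n : Nat) : Int)) dst) 63
      = ((n ^^^ pvLowN n : Nat) : Int) := by
  have hn64 : n < 64 := hn ▸ pv_band63_lt _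
  apply pv_int_ext
  intro i
  rw [pv_testBit_band63, pv_testBit_bxor, pv_testBit_bxor, pv_testBit_natCast,
      pv_testBit_natCast, Nat.testBit_xor]
  have hnb : n.testBit i = ((PySem.Int.bxor src dst).testBit i && decide (i < 6)) := by
    rw [hn, pv_testBit_toNat _ (pv_band63_nonneg _), pv_testBit_band63]
  rw [hnb, pv_testBit_bxor]
  by_cases hi : i < 6
  · simp only [hi, decide_true, Bool.and_true]
    cases src.testBit i <;> cases dst.testBit i <;> cases (pvLowN n).testBit i <;> rfl
  · have hlow : (pvLowN n).testBit i = false :=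
      pv_nat_testBit_high (lt_of_le_of_lt (pv_lowN_le n) hn64) (by omega)
    simp [hi, hlow]

theorem pv_xor_shift (src : Int) (k m : Nat) :
    PySem.Int.bxor src (((m ^^^ k : Nat) : Int))
      = PySem.Int.bxor (PySem.Int.bxor src ((k : Nat) : Int)) ((m : Nat) : Int) := by
  apply pv_int_ext
  intro i
  rw [pv_testBit_bxor, pv_testBit_bxor, pv_testBit_bxor, pv_testBit_natCast,
      pv_testBit_natCast, pv_testBit_natCast, Nat.testBit_xor]
  cases src.testBit i <;> cases m.testBit i <;> cases k.testBit i <;> rfl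

-- B's recursion computes src XOR each offset of pvPathB.
theorem pv_alt_map : ∀ (f : Nat) (src dst : Int),
    pvAltGo f src dst
      = (pvPathB f ((PySem.Int.band (PySem.Int.bxor src dst) 63).toNat)).map
          (fun m => PySem.Int.bxor src ((m : Nat) : Int)) := by
  intro f
  induction f with
  | zero =>
      intro src dst
      simp [pvAltGo, pvPathB, PySem.Int.bxor_zero]
  | succ f ih =>
      intro src dst
      by_cases hd : PySem.Int.band (PySem.Int.bxor src dst) 63 = 0
      · have hn : (PySem.Int.band (PySem.Int.bxor src dst) 63).toNat = 0 := by
          rw [hd]; rfl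
        simp [pvAltGo, pvPathB, hd, PySem.Int.bxor_zero]
      · set d := PySem.Int.band (PySem.Int.bxor src dst) 63 with hdc
        set n := d.toNat with hnc
        have hcast : d = ((n : Nat) : Int) := pv_band63_cast _
        have hn0 : n ≠ 0 := by
          intro h
          apply hd
          rw [hcast, h]
          rfl
        have hlow : PySem.Int.band d (-d) = ((pvLowN n : Nat) : Int) := by
          rw [hcast]; exact pv_low_cast n hn0
        have hgo : pvAltGo (f+1) src dst
            = src :: pvAltGo f (PySem.Int.bxor src ((pvLowN n : Nat) : Int)) dst := by
          show (if d = 0 then [src] else src :: pvAltGo f (PySem.Int.bxor src (PySem.Int.band d (-d))) dst)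
              = src :: pvAltGo f (PySem.Int.bxor src ((pvLowN n : Nat) : Int)) dst
          rw [if_neg hd, hlow]
        rw [hgo]
        have hstep := pv_step_diff src dst n (by rw [hnc, hdc])
        have hnn' : (PySem.Int.band (PySem.Int.bxor (PySem.Int.bxor src ((pvLowN n : Nat) : Int)) dst) 63).toNat
            = n ^^^ pvLowN n := by
          rw [hstep]; exact Int.toNat_natCast _
        have hB : pvPathB (f+1) n
            = 0 :: (pvPathB f (n ^^^ pvLowN n)).map (· ^^^ pvLowN n) := by
          show (if n = 0 then [0] else 0 :: (pvPathB f (n ^^^ pvLowN n)).map (· ^^^ pvLowN n))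
              = 0 :: (pvPathB f (n ^^^ pvLowN n)).map (· ^^^ pvLowN n)
          rw [if_neg hn0]
        rw [hB, ih (PySem.Int.bxor src ((pvLowN n : Nat) : Int)) dst, hnn']
        simp only [List.map_cons, List.map_map]
        congr 1
        · show src = PySem.Int.bxor src (((0 : Nat) : Int))
          simp [PySem.Int.bxor_zero]
        · apply List.map_congr_left
          intro m _
          simp only [Function.comp_apply]
          exact (pv_xor_shift src (pvLowN n) m).symm

-- The two offset paths coincide on every 6-bit diff (finite check).
theorem pv_pathAB : ∀ n, n < 64 → pvPathB 7 n = pvPathA n := by decide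

-- A's closed-form path equals src XOR each offset of pvPathA.
theorem pv_pathA_map (src dst : Int) (n : Nat)
    (hn : n = (PySem.Int.band (PySem.Int.bxor src dst) 63).toNat) :
    src :: ((List.range 6).filter
        (fun (b : Nat) => PySem.Int.band (PySem.Int.bxor src dst) ((1 : Int) <<< b) != 0)).map
        (fun (b : Nat) => PySem.Int.bxor src (PySem.Int.band (PySem.Int.bxor src dst) ((2 : Int) <<< b - 1)))
      = (pvPathA n).map (fun m => PySem.Int.bxor src ((m : Nat) : Int)) := by
  set diff := PySem.Int.bxor src dst with hdc
  have hnb : ∀ i, n.testBit i = (diff.testBit i && decide (i < 6)) := by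
    intro i
    rw [hn, pv_testBit_toNat _ (pv_band63_nonneg _), pv_testBit_band63]
  unfold pvPathA
  simp only [List.map_cons, List.map_map]
  congr 1
  · show src = PySem.Int.bxor src (((0 : Nat) : Int))
    simp [PySem.Int.bxor_zero]
  · have hfilter : (List.range 6).filter (fun (b : Nat) => PySem.Int.band diff ((1 : Int) <<< b) != 0)
        = (List.range 6).filter (fun b => n.testBit b) := by
      apply List.filter_congr
      intro b hb
      have hb6 : b < 6 := List.mem_range.mp hb
      have h1 : (PySem.Int.band diff ((1 : Int) <<< b) != 0) = diff.testBit b := by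
        rw [pv_one_shl]
        by_cases h : diff.testBit b = true
        · rw [h, bne_iff_ne]
          exact (pv_band_pow_ne_zero_iff diff b).mpr h
        · have hb' : diff.testBit b = false := Bool.eq_false_iff.mpr (fun hh => h hh)
          have hz : PySem.Int.band diff ((2^b : Nat) : Int) = 0 := by
            by_contra hc
            exact h ((pv_band_pow_ne_zero_iff diff b).mp hc)
          rw [hb', hz]
          rfl
      rw [h1, hnb b]
      simp [hb6]
    rw [hfilter]
    apply List.map_congr_left
    intro b hb
    have hb6 : b < 6 := List.mem_range.mp (List.mem_of_mem_filter hb)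
    show PySem.Int.bxor src (PySem.Int.band diff ((2 : Int) <<< b - 1))
        = PySem.Int.bxor src (((n &&& (2^(b+1)-1) : Nat) : Int))
    congr 1
    rw [pv_two_shl_sub_one]
    apply pv_int_ext
    intro i
    rw [pv_testBit_band, pv_testBit_natCast, pv_testBit_natCast, Nat.testBit_and,
        Nat.testBit_two_pow_sub_one, hnb i]
    by_cases hi : i < b + 1
    · have hi6 : i < 6 := by omega
      simp [hi, hi6]
    · simp [hi]

-- ===== VERDICT (by name: the statement is the Claim_ definition above) =====
theorem ecube_route_spec : Claim_equal_ecube_route := by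
  intro src dst _
  show ecube_route src dst = ecube_route_alt src dst
  set n := (PySem.Int.band (PySem.Int.bxor src dst) 63).toNat with hn
  have hA : ecube_route src dst
      = (pvPathA n).map (fun m => PySem.Int.bxor src ((m : Nat) : Int)) := by
    show (((List.range 6).foldl (ecubeStepA (PySem.Int.bxor src dst)) ([src], src)).1)
        = (pvPathA n).map (fun m => PySem.Int.bxor src ((m : Nat) : Int))
    rw [pv_fold_inv]
    exact pv_pathA_map src dst n hn
  have hB : ecube_route_alt src dst
      = (pvPathB 7 n).map (fun m => PySem.Int.bxor src ((m : Nat) : Int)) := by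
    show pvAltGo 7 src dst = _
    rw [pv_alt_map 7 src dst]
  rw [hA, hB, pv_pathAB n (hn ▸ pv_band63_lt _)]
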